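-- pv_equiv track=rewrite | github.com/tuto193/Financing_App | Financer.py | recover_spaces
-- ===== SOURCE A (Python) =====
-- def recover_spaces( s:str ) -> str:
--     """
--     Replace all underscores ('_') in a string with spaces
--     """
--     s2 :str= ''
--     for letter in s:
--         if letter != '_':
--             s2 += letter
--         else:
--             s2 += ' '
--     return s2
-- ===== SOURCE B (Python) =====
-- def recover_spaces(s: str) -> str:
--     """
--     Replace all underscores ('_') in a string with spaces
--     """
--     return ' '.join(s.split('_'))
-- ===== Notes on version B (the rewrite author's own statement) =====
-- stated objective: idiomatic
-- what changed: Replaces the per-character loop with a quadratic string accumulator by a tokenize-then-join: split the string at each underscore and join the pieces with spaces.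
import Mathlib
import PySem

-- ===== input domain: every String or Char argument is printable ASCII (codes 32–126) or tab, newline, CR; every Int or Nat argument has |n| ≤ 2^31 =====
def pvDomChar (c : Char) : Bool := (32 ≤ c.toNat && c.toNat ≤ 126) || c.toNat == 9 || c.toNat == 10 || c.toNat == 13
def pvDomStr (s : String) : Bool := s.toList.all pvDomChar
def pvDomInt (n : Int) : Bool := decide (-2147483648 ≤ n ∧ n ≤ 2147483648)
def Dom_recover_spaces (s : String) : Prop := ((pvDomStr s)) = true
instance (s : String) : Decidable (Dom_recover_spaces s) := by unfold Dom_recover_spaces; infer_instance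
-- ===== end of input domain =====

-- B replaces A's per-character accumulation loop by split-at-underscores + join-with-spaces (more idiomatic).

-- ===== PORT A =====
-- per-character loop: s2 += letter  /  s2 += ' '  (string built as List Char, packed at the end)
def recover_spaces (s : String) : String :=
  String.ofList (s.toList.foldl
    (fun s2 letter => if letter ≠ '_' then s2 ++ [letter] else s2 ++ [' ']) [])

-- ===== PORT B =====
-- ' '.join(s.split('_')) : split = List.splitOn, join = List.intercalate
def recover_spaces_alt (s : String) : String :=
  String.ofList ([' '].intercalate (s.toList.splitOn '_'))

-- ===== PRECONDITION & SPEC =====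
def Spec_recover_spaces (s : String) (out : String) : Prop := out = recover_spaces_alt s
instance (s : String) (out : String) : Decidable (Spec_recover_spaces s out) := by unfold Spec_recover_spaces; infer_instance

-- ===== CLAIM (what is proved, stated in full; the proofs are below) =====
def Claim_equal_recover_spaces : Prop := ∀ (s : String), Dom_recover_spaces s → Spec_recover_spaces s (recover_spaces s)

-- ===== LEMMAS AND PROOFS =====

theorem pv_intercalate_modifyHead {α : Type} (sep : List α) (c : α) (l : List (List α))
    (h : l ≠ []) :
    sep.intercalate (List.modifyHead (List.cons c) l) = c :: sep.intercalate l := by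
  match l with
  | [] => exact absurd rfl h
  | [x] => simp [List.modifyHead, List.intercalate]
  | x :: y :: t => simp [List.modifyHead, List.intercalate, List.intersperse]

theorem pv_intercalate_nil_cons {α : Type} (sep : List α) (l : List (List α))
    (h : l ≠ []) :
    sep.intercalate ([] :: l) = sep ++ sep.intercalate l := by
  match l with
  | [] => exact absurd rfl h
  | [x] => simp [List.intercalate]
  | x :: y :: t => simp [List.intercalate, List.intersperse]

theorem pv_loop_eq (cs : List Char) (acc : List Char) :
    cs.foldl (fun s2 letter => if letter ≠ '_' then s2 ++ [letter] else s2 ++ [' ']) acc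
      = acc ++ [' '].intercalate (cs.splitOn '_') := by
  induction cs generalizing acc with
  | nil => simp [List.splitOn, List.intercalate]
  | cons a cs ih =>
    rw [List.foldl_cons, ih]
    unfold List.splitOn
    rw [List.splitOnP_cons]
    by_cases ha : a = '_'
    · subst ha
      simp only [ne_eq, not_true_eq_false, if_false, if_pos (by simp : ('_' == '_') = true)]
      rw [pv_intercalate_nil_cons _ _ (List.splitOnP_ne_nil _ _)]
      simp
    · rw [if_pos (by simpa using ha), if_neg (by simpa using ha)]
      rw [pv_intercalate_modifyHead _ _ _ (List.splitOnP_ne_nil _ _)]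
      simp

-- ===== VERDICT (by name: the statement is the Claim_ definition above) =====
theorem recover_spaces_spec : Claim_equal_recover_spaces := by
  intro s _
  unfold Spec_recover_spaces recover_spaces recover_spaces_alt
  rw [pv_loop_eq]
  simp
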